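-- pv_equiv track=rewrite | github.com/wsw579/codingTest | 프로그래머스/0/120924. 다음에 올 숫자/다음에 올 숫자.py | solution
-- ===== SOURCE A (Python) =====
-- def solution(common):
--     answer = 0
--     for i in range(1,len(common)-1):
--         if (common[i] - common[i-1]) == (common[i+1] - common[i]):
--             n = common[i] - common[i-1]
--             answer = common[len(common)-1] + n
--         else:
--             n = common[i] // common[i-1]
--             answer = common[len(common)-1] * n
--     return answer
-- ===== SOURCE B (Python) =====
-- def solution(common):
--     if len(common) < 3:
--         return 0
--     a, b, c = common[-3], common[-2], common[-1]
--     if c - b == b - a: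
--         return c + (b - a)
--     return c * (b // a)
-- ===== Notes on version B (the rewrite author's own statement) =====
-- stated objective: faster
-- what changed: B drops A's O(n) overwriting loop and decides directly from the last three elements (closed form over the final triple), since A's loop discards every iteration's result except the last.
import Mathlib
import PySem

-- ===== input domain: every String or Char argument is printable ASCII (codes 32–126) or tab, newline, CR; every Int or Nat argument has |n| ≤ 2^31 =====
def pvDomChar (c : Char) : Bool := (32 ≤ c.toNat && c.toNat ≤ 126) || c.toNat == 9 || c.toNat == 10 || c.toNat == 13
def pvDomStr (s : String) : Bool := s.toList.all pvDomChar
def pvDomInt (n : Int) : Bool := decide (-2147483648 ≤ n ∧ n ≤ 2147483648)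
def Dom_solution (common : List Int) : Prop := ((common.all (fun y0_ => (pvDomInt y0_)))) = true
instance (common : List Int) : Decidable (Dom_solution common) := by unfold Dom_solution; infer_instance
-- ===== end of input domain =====

-- B decides from the last three elements only; A's loop overwrites `answer` each step, so only the
-- final iteration matters. Equivalence is over the return value; neither program mutates its input.

-- ===== PORT A =====
def solution (common : List Int) : Int :=
  (PySem.List.pyRange 1 ((common.length : Int) - 1) 1).foldl
    (fun _answer i =>
      if PySem.List.pyGetD common i 0 - PySem.List.pyGetD common (i - 1) 0 =
         PySem.List.pyGetD common (i + 1) 0 - PySem.List.pyGetD common i 0 then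
        let n := PySem.List.pyGetD common i 0 - PySem.List.pyGetD common (i - 1) 0
        PySem.List.pyGetD common ((common.length : Int) - 1) 0 + n
      else
        let n := PySem.Int.floordiv (PySem.List.pyGetD common i 0)
                                    (PySem.List.pyGetD common (i - 1) 0)
        PySem.List.pyGetD common ((common.length : Int) - 1) 0 * n)
    0

-- ===== PORT B =====
def solution_alt (common : List Int) : Int :=
  if common.length < 3 then 0
  else
    let a := PySem.List.pyGetD common (-3) 0
    let b := PySem.List.pyGetD common (-2) 0
    let c := PySem.List.pyGetD common (-1) 0
    if c - b = b - a then c + (b - a) else c * PySem.Int.floordiv b a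

-- ===== PRECONDITION & SPEC =====
-- Pre_ excludes exactly the inputs on which Python A raises ZeroDivisionError: some interior
-- index i whose triple is non-arithmetic while common[i-1] = 0.
def Pre_solution (common : List Int) : Prop :=
  ∀ i ∈ List.range common.length, 1 ≤ i → i + 1 < common.length →
    (common.getD i 0 - common.getD (i - 1) 0 = common.getD (i + 1) 0 - common.getD i 0
      ∨ common.getD (i - 1) 0 ≠ 0)
instance (common : List Int) : Decidable (Pre_solution common) := by
  unfold Pre_solution; infer_instance

def pvWitness_solution : List Int := [1, 2, 4, 8]

def Spec_solution (common : List Int) (out : Int) : Prop := out = solution_alt common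
instance (common : List Int) (out : Int) : Decidable (Spec_solution common out) := by
  unfold Spec_solution; infer_instance

-- ===== CLAIM (what is proved, stated in full; the proofs are below) =====
def Claim_equal_solution : Prop :=
  ∀ (common : List Int), Dom_solution common → Pre_solution common →
    Spec_solution common (solution common)

-- ===== LEMMAS AND PROOFS =====

-- A's loop body ignores the accumulator, so the fold is determined by the last index alone.
theorem foldl_ignore_acc {α β : Type} (g : β → α) (s : α) (l : List β) :
    l.foldl (fun _ i => g i) s = (l.getLast?).elim s g := by
  induction l generalizing s with
  | nil => rfl
  | cons x xs ih =>
    cases xs with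
    | nil => rfl
    | cons y ys => simpa using ih (g x)

theorem solution_spec : Claim_equal_solution := by
  intro common _ _
  unfold Spec_solution solution solution_alt
  rw [foldl_ignore_acc]
  by_cases h : common.length < 3
  · rw [PySem.List.pyRange_one_eq_nil (by omega)]
    simp [h]
  · rw [not_lt] at h
    have hsplit : ((common.length : Int) - 1) = ((common.length : Int) - 2) + 1 := by ring
    rw [hsplit, PySem.List.pyRange_one_succ_right (by omega)]
    simp only [List.getLast?_concat, Option.elim]
    have e1 : PySem.List.pyGetD common ((common.length : Int) - 2) 0 = common[common.length - 2] := by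
      rw [PySem.List.pyGetD_eq_getElem common 0 (by omega) (by omega)]
      congr 1; omega
    have e2 : PySem.List.pyGetD common ((common.length : Int) - 2 - 1) 0 = common[common.length - 3] := by
      rw [PySem.List.pyGetD_eq_getElem common 0 (by omega) (by omega)]
      congr 1; omega
    have e3 : PySem.List.pyGetD common ((common.length : Int) - 2 + 1) 0 = common[common.length - 1] := by
      rw [PySem.List.pyGetD_eq_getElem common 0 (by omega) (by omega)]
      congr 1; omega
    have f1 : PySem.List.pyGetD common (-1) 0 = common[common.length - 1] := by
      rw [PySem.List.pyGetD_neg_ofNat common 1 0 (by omega) (by omega)]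
    have f2 : PySem.List.pyGetD common (-2) 0 = common[common.length - 2] := by
      rw [PySem.List.pyGetD_neg_ofNat common 2 0 (by omega) (by omega)]
    have f3 : PySem.List.pyGetD common (-3) 0 = common[common.length - 3] := by
      rw [PySem.List.pyGetD_neg_ofNat common 3 0 (by omega) (by omega)]
    rw [e1, e2, e3, f1, f2, f3]
    simp only [if_neg (by omega : ¬ common.length < 3)]
    split_ifs with h1 h2 h2
    · rfl
    · omega
    · omega
    · rfl
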